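-- pv_equiv track=rewrite | github.com/sequenda/gavenaoop | labs/pyfiles/lab2/lab2ex2.py | delete_duplicate_characters
-- ===== SOURCE A (Python) =====
-- def delete_duplicate_characters(string):
--     result = []
--     counts = {}
--
--     # .lower() is used to make detection "uniform"
--     # setting how many times each letter appears in the dictionary counts
--     for let in string.lower():
--         if let in counts:
--             counts[let] += 1
--         else:
--             counts[let] = 1
--
--     # 2nd part of the check: if letter only appears once, keep it
--     for let in counts:
--         if counts[let.lower()] == 1:
--             result.append(let)
--
--     return "".join(result)
-- ===== SOURCE B (Python) =====
-- def delete_duplicate_characters(string):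
--     # Worklist-with-removal algorithm: repeatedly take the first remaining character;
--     # if it still occurs later, purge all its copies, otherwise it is unique and kept.
--     # No frequency counting at all. Order of kept characters = first-occurrence order.
--     chars = list(string.lower())
--     out = []
--     while chars:
--         head = chars.pop(0)
--         if head in chars:
--             chars = [c for c in chars if c != head]
--         else:
--             out.append(head)
--     return "".join(out)
-- ===== Notes on version B (the rewrite author's own statement) =====
-- stated objective: alternative
-- what changed: Replaced A's frequency-dictionary-then-key-scan with a worklist-with-removal loop that never counts: it pops the first remaining character, purges all its later copies if it repeats, and keeps it otherwise.
import Mathlib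
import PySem

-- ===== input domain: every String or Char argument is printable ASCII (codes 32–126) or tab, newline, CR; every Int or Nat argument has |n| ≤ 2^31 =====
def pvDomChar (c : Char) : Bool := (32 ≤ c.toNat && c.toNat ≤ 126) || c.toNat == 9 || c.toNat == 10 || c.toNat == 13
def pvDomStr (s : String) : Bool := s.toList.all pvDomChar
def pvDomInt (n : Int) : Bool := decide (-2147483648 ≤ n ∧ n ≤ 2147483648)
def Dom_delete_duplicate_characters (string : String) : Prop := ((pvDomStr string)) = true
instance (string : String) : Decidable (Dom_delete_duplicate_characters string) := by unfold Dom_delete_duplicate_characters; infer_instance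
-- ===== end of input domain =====

-- B replaces A's count-dict-then-iterate-keys with a worklist-with-removal loop that
-- never counts: it pops the first remaining character, purges its later copies if any,
-- and keeps it otherwise (alternative decomposition, not faster).

-- ===== PORT A =====
def delete_duplicate_characters (string : String) : String :=
  let result : List Char := []
  let counts : PySem.Dict Char Int := PySem.Dict.empty
  let counts := (PySem.Str.lower string).toList.foldl
    (fun counts c =>
      if counts.contains c then counts.insert c (counts.getD c 0 + 1)
      else counts.insert c 1) counts
  let result := counts.keys.foldl
    (fun result c =>
      if counts.getD (PySem.Chars.lowerChar c) 0 == 1 then result ++ [c] else result) result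
  String.mk result

-- ===== PORT B =====
-- the while-loop of Source B: pop the head; purge its copies if it repeats, else keep it
def pvWorklist : List Char → List Char
  | [] => []
  | h :: t =>
    if h ∈ t then pvWorklist (t.filter (fun c => c ≠ h))
    else h :: pvWorklist t
termination_by L => L.length
decreasing_by
  · have := List.length_filter_le (fun x : {x // x ∈ t} => decide (↑x ≠ h)) t.attach
    simp at this ⊢
    omega
  · simp

def delete_duplicate_characters_alt (string : String) : String :=
  String.mk (pvWorklist (PySem.Str.lower string).toList)

-- ===== PRECONDITION & SPEC =====
def Spec_delete_duplicate_characters (string : String) (out : String) : Prop := out = delete_duplicate_characters_alt string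
instance (string : String) (out : String) : Decidable (Spec_delete_duplicate_characters string out) := by unfold Spec_delete_duplicate_characters; infer_instance

-- ===== CLAIM (what is proved, stated in full; the proofs are below) =====
def Claim_equal_delete_duplicate_characters : Prop := ∀ (string : String), Dom_delete_duplicate_characters string → Spec_delete_duplicate_characters string (delete_duplicate_characters string)

-- ===== LEMMAS AND PROOFS =====

-- ASCII lowering is idempotent (in fact for every Char).
theorem pv_lowerChar_idem (c : Char) :
    PySem.Chars.lowerChar (PySem.Chars.lowerChar c) = PySem.Chars.lowerChar c := by
  unfold PySem.Chars.lowerChar PySem.Chars.isupper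
  split_ifs with h1 h2 <;> try rfl
  exfalso
  simp only [Bool.and_eq_true, decide_eq_true_eq, Char.le_def, UInt32.le_iff_toNat_le] at h1 h2
  have hA : ('A' : Char).val.toNat = 65 := rfl
  have hZ : ('Z' : Char).val.toNat = 90 := rfl
  have hval : (c.toNat + 32).isValidChar := Or.inl (by
    show c.toNat + 32 < 55296
    have : c.toNat = c.val.toNat := rfl
    omega)
  have hv : (Char.ofNat (c.toNat + 32)).val.toNat = c.toNat + 32 := by
    show (Char.ofNat (c.toNat + 32)).toNat = c.toNat + 32
    rw [Char.toNat_ofNat, if_pos hval]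
  have hct : c.toNat = c.val.toNat := rfl
  omega

-- A's counting loop (branch on membership) is Counter's step.
theorem pv_counts_eq_counter (L : List Char) :
    L.foldl (fun (d : PySem.Dict Char Int) c =>
        if d.contains c then d.insert c (d.getD c 0 + 1) else d.insert c 1)
      PySem.Dict.empty = PySem.Dict.counter L := by
  have hstep : (fun (d : PySem.Dict Char Int) c =>
      if d.contains c then d.insert c (d.getD c 0 + 1) else d.insert c 1)
      = fun (d : PySem.Dict Char Int) c => d.insert c (d.getD c 0 + 1) := by
    funext d c
    by_cases h : d.contains c = true
    · rw [h]; simp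
    · have h' : d.contains c = false := by simpa using h
      rw [h', PySem.Dict.getD_of_not_contains d 0 h']
      simp
  rw [hstep, PySem.Dict.foldl_insert_getD_add_one_eq_counter]

-- Filtering the deduplicated list by "appears exactly once" equals filtering the list itself.
theorem pv_filter_ofList_eq (p : Char → Bool) (L : List Char)
    (h : ∀ x ∈ L, p x = true → List.count x L = 1) :
    (PySem.Set.ofList L).filter p = L.filter p := by
  induction L using List.reverseRecOn with
  | nil => rfl
  | append_singleton xs x ih =>
    rw [PySem.Set.ofList_append_singleton]
    by_cases hx : x ∈ PySem.Set.ofList xs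
    · have hxl : x ∈ xs := (PySem.Set.mem_ofList xs x).mp hx
      have hpx : p x = false := by
        by_contra hp
        have hp' : p x = true := by simpa using hp
        have := h x (by simp) hp'
        have h1 : 1 ≤ List.count x xs := List.one_le_count_iff.mpr hxl
        rw [List.count_append, List.count_singleton] at this
        simp at this
        omega
      rw [PySem.Set.add_of_mem hx, List.filter_append]
      simp [hpx]
      exact ih (by
        intro y hy hpy
        have hyx : y ≠ x := by rintro rfl; rw [hpy] at hpx; cases hpx
        have := h y (by simp [hy]) hpy
        rw [List.count_append, List.count_singleton] at this
        simp [Ne.symm hyx] at this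
        exact this)
    · have hxl : x ∉ xs := fun hm => hx ((PySem.Set.mem_ofList xs x).mpr hm)
      rw [PySem.Set.add_of_not_mem hx, List.filter_append, List.filter_append]
      congr 1
      exact ih (by
        intro y hy hpy
        have hyx : y ≠ x := by rintro rfl; exact hxl hy
        have := h y (by simp [hy]) hpy
        rw [List.count_append, List.count_singleton] at this
        simp [Ne.symm hyx] at this
        exact this)

-- Every character of the lowercased list is fixed by lowerChar.
theorem pv_mem_lower_fix (s : List Char) (c : Char) (hc : c ∈ PySem.Chars.lower s) :
    PySem.Chars.lowerChar c = c := by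
  unfold PySem.Chars.lower at hc
  obtain ⟨y, _, rfl⟩ := List.mem_map.mp hc
  exact pv_lowerChar_idem y

-- The worklist loop keeps exactly the characters occurring once.
theorem pv_worklist_eq_filter_aux (n : Nat) : ∀ (L : List Char), L.length ≤ n →
    pvWorklist L = L.filter (fun c => List.count c L == 1) := by
  induction n with
  | zero =>
    intro L hL
    have : L = [] := List.eq_nil_of_length_eq_zero (Nat.le_zero.mp hL)
    subst this
    rw [pvWorklist]
    rfl
  | succ n ih =>
    intro L hL
    match L with
    | [] => rw [pvWorklist]; rfl
    | h :: t =>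
    simp only [List.length_cons, Nat.succ_le_succ_iff] at hL
    by_cases hmem : h ∈ t
    · rw [pvWorklist, if_pos hmem,
        ih _ (le_trans (List.length_filter_le _ _) hL)]
      have hhc : (List.count h (h :: t) == 1) = false := by
        have : 1 ≤ List.count h t := List.one_le_count_iff.mpr hmem
        simp [List.count_cons]
        omega
      rw [List.filter_cons, hhc]
      simp only [List.filter_filter]
      apply List.filter_congr
      intro x hx
      by_cases hxh : x = h
      · subst hxh
        have : 1 ≤ List.count x t := List.one_le_count_iff.mpr hx
        simp [List.count_cons]
        omega
      · have hcf : List.count x (t.filter (fun c => c ≠ h)) = List.count x t := by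
          rw [List.count_filter]
          simp [hxh]
        rw [hcf]
        simp [List.count_cons, hxh, Ne.symm hxh]
    · rw [pvWorklist, if_neg hmem, ih t hL]
      have hhc : (List.count h (h :: t) == 1) = true := by
        have : List.count h t = 0 := List.count_eq_zero.mpr hmem
        simp [List.count_cons, this]
      rw [List.filter_cons, hhc]
      congr 1
      apply List.filter_congr
      intro x hx
      have hxh : x ≠ h := fun e => hmem (e ▸ hx)
      simp [List.count_cons, Ne.symm hxh]

theorem pv_worklist_eq_filter (L : List Char) :
    pvWorklist L = L.filter (fun c => List.count c L == 1) :=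
  pv_worklist_eq_filter_aux L.length L le_rfl

-- ===== VERDICT (by name: the statement is the Claim_ definition above) =====
theorem delete_duplicate_characters_spec : Claim_equal_delete_duplicate_characters := by
  intro string _
  show delete_duplicate_characters string = delete_duplicate_characters_alt string
  unfold delete_duplicate_characters delete_duplicate_characters_alt
  simp only [PySem.Str.toList_lower]
  set L := PySem.Chars.lower string.toList with hL
  rw [pv_counts_eq_counter L, PySem.Dict.keys_counter,
    PySem.List.foldl_append_if_eq_filter, List.nil_append, pv_worklist_eq_filter]
  congr 1
  have hcong : (PySem.Set.ofList L).filter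
      (fun c => (PySem.Dict.counter L).getD (PySem.Chars.lowerChar c) 0 == 1)
      = (PySem.Set.ofList L).filter (fun c => List.count c L == 1) := by
    apply List.filter_congr
    intro x hx
    have hxl : x ∈ L := (PySem.Set.mem_ofList L x).mp hx
    rw [pv_mem_lower_fix string.toList x (hL ▸ hxl), PySem.Dict.getD_counter]
    by_cases h1 : List.count x L = 1
    · simp [h1]
    · have : ¬ ((List.count x L : Int) = 1) := by exact_mod_cast h1
      simp [h1, this]
  rw [hcong]
  exact pv_filter_ofList_eq _ L (fun x _ hp => by simpa using hp)
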